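-- pv_equiv track=rewrite | github.com/zhiying-tutor/code2video | src/scope_refine.py | _clean_code_format
-- ===== SOURCE A (Python) =====
-- from typing import Dict, List, Tuple, Optional, Any
--
-- def _clean_code_format(code: str) -> Optional[str]:
--     """Clean and format code"""
--     if not code:
--         return None
--
--     # Remove markdown code block markers
--     if "```python" in code:
--         code = code.split("```python")[1].split("```")[0].strip()
--     elif "```" in code:
--         code = code.split("```")[1].strip()
--
--     # Remove extra empty lines
--     lines = code.split("\n")
--     cleaned_lines = []
--     prev_empty = False
--
--     for line in lines:
--         if line.strip():
--             cleaned_lines.append(line)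
--             prev_empty = False
--         elif not prev_empty:
--             cleaned_lines.append(line)
--             prev_empty = True
--
--     return "\n".join(cleaned_lines)
-- ===== SOURCE B (Python) =====
-- from itertools import groupby
-- from typing import Optional
--
--
-- def _clean_code_format(code: str) -> Optional[str]:
--     """Clean and format code (groupby-based blank-line collapsing)."""
--     if not code:
--         return None
--
--     # Remove markdown code block markers
--     if "```python" in code:
--         code = code.split("```python")[1].split("```")[0].strip()
--     elif "```" in code:
--         code = code.split("```")[1].strip()
--
--     # Collapse runs of blank lines: keep every non-blank line,
--     # keep only the first line of each blank run.
--     out = []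
--     for nonblank, group in groupby(code.split("\n"), key=lambda l: bool(l.strip())):
--         if nonblank:
--             out.extend(group)
--         else:
--             out.append(next(group))
--     return "\n".join(out)
-- ===== Notes on version B (the rewrite author's own statement) =====
-- stated objective: idiomatic
-- what changed: The stateful prev_empty flag loop is replaced by an itertools.groupby pass over the lines: non-blank runs are emitted whole and each blank run contributes only its first line; the markdown-stripping prelude is unchanged.
import Mathlib
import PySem

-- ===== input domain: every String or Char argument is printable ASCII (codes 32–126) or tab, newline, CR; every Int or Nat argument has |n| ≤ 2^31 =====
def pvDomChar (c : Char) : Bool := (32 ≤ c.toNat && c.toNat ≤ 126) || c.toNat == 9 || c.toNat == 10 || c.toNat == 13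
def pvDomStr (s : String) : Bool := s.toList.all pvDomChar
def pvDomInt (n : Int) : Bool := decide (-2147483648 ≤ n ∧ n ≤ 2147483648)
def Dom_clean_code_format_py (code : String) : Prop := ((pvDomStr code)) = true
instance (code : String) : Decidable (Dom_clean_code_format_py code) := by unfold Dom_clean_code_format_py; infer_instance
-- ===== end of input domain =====

-- B replaces A's stateful prev_empty flag loop with an itertools.groupby pass over the
-- lines (whole blank runs collapse to their first line); objective: idiomatic.

-- ===== PORT A =====
-- the markdown-stripping prelude, shared verbatim by A and B (identical Python text in both)
def pvStripMarkdown (code : String) : String :=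
  if PySem.Str.isIn "```python" code then
    PySem.Str.strip ((PySem.List.pyGet? ((PySem.Str.split? ((PySem.List.pyGet? ((PySem.Str.split? code "```python").getD []) 1).getD "") "```").getD []) 0).getD "")
  else if PySem.Str.isIn "```" code then
    PySem.Str.strip ((PySem.List.pyGet? ((PySem.Str.split? code "```").getD []) 1).getD "")
  else code

-- A's loop: accumulator of (cleaned_lines, prev_empty), one step per line
def pvStep (key : String → Bool) (st : List String × Bool) (line : String) : List String × Bool :=
  if key line then (st.1 ++ [line], false)
  else if !st.2 then (st.1 ++ [line], true)
  else (st.1, true)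

def pvCleanLines (lines : List String) : List String :=
  (lines.foldl (pvStep (fun line => PySem.Str.strip line != "")) ([], false)).1

def clean_code_format_py (code : String) : Option String :=
  if code == "" then none
  else
    let code := pvStripMarkdown code
    some (PySem.Str.join "\n" (pvCleanLines ((PySem.Str.split? code "\n").getD [])))

-- ===== PORT B =====
-- itertools.groupby: split the list into maximal runs of equal key
def pvGroupBy (key : String → Bool) : List String → List (Bool × List String)
  | [] => []
  | x :: xs =>
      (key x, x :: xs.takeWhile (fun y => key y == key x)) ::
        pvGroupBy key (xs.dropWhile (fun y => key y == key x))
termination_by ls => ls.length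
decreasing_by
  simpa using Nat.lt_succ_of_le (List.length_dropWhile_le _ _)

-- B's loop body: a nonblank group is kept whole, a blank group contributes its first line
def pvGroupLines (lines : List String) : List String :=
  (pvGroupBy (fun l => PySem.Str.strip l != "") lines).flatMap
    (fun g => if g.1 then g.2 else g.2.take 1)

def clean_code_format_py_alt (code : String) : Option String :=
  if code == "" then none
  else
    let code := pvStripMarkdown code
    some (PySem.Str.join "\n" (pvGroupLines ((PySem.Str.split? code "\n").getD [])))

-- ===== PRECONDITION & SPEC =====
def Spec_clean_code_format_py (code : String) (out : Option String) : Prop := out = clean_code_format_py_alt code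
instance (code : String) (out : Option String) : Decidable (Spec_clean_code_format_py code out) := by unfold Spec_clean_code_format_py; infer_instance

-- ===== CLAIM (what is proved, stated in full; the proofs are below) =====
def Claim_equal_clean_code_format_py : Prop := ∀ (code : String), Dom_clean_code_format_py code → Spec_clean_code_format_py code (clean_code_format_py code)

-- ===== LEMMAS AND PROOFS =====

-- A's loop rewritten with the flag as a recursion parameter (proof device only)
def pvEmit (key : String → Bool) : Bool → List String → List String
  | _, [] => []
  | prev, l :: ls =>
      if key l then l :: pvEmit key false ls
      else if !prev then l :: pvEmit key true ls
      else pvEmit key true ls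

theorem pvFoldl_eq_emit (key : String → Bool) (ls : List String) :
    ∀ (acc : List String) (prev : Bool),
      (ls.foldl (pvStep key) (acc, prev)).1 = acc ++ pvEmit key prev ls := by
  induction ls with
  | nil => intro acc prev; simp [pvEmit]
  | cons l ls ih =>
      intro acc prev
      by_cases h : key l
      · simp [pvStep, pvEmit, h, ih]
      · cases prev <;> simp [pvStep, pvEmit, h, ih]

theorem pvEmit_true_run (key : String → Bool) (run rest : List String)
    (h : ∀ y ∈ run, key y = true) :
    pvEmit key false (run ++ rest) = run ++ pvEmit key false rest := by
  induction run with
  | nil => simp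
  | cons y run ih =>
      have hy : key y = true := h y (List.mem_cons_self ..)
      simp only [List.cons_append, pvEmit, hy, if_true]
      simp [ih fun z hz => h z (List.mem_cons_of_mem _ hz)]

theorem pvEmit_false_run (key : String → Bool) (run rest : List String)
    (h : ∀ y ∈ run, key y = false) :
    pvEmit key true (run ++ rest) = pvEmit key true rest := by
  induction run with
  | nil => simp
  | cons y run ih =>
      have hy : key y = false := h y (List.mem_cons_self ..)
      simp only [List.cons_append, pvEmit, hy]
      simpa using ih fun z hz => h z (List.mem_cons_of_mem _ hz)

-- the head of a dropWhile does not satisfy the predicate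
theorem pvDropWhile_head (p : String → Bool) (l : List String) :
    ∀ y t, l.dropWhile p = y :: t → p y = false := by
  induction l with
  | nil => intro y t h; simp at h
  | cons x xs ih =>
      intro y t h
      by_cases hx : p x
      · exact ih y t (by simpa [List.dropWhile, hx] using h)
      · simp [List.dropWhile, hx] at h
        rw [← h.1]; simpa using hx

-- after a blank run the next line (if any) is non-blank, so the flag no longer matters
theorem pvEmit_true_eq_false (key : String → Bool) (rest : List String)
    (h : ∀ y t, rest = y :: t → key y = true) :
    pvEmit key true rest = pvEmit key false rest := by
  cases rest with
  | nil => rfl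
  | cons y t => simp [pvEmit, h y t rfl]

theorem pvEmit_eq_groups (key : String → Bool) :
    ∀ n ls, ls.length ≤ n →
      pvEmit key false ls =
        (pvGroupBy key ls).flatMap (fun g => if g.1 then g.2 else g.2.take 1) := by
  intro n
  induction n with
  | zero =>
      intro ls h
      have : ls = [] := List.eq_nil_of_length_eq_zero (Nat.le_zero.mp h)
      simp [this, pvEmit, pvGroupBy]
  | succ n ih =>
      intro ls h
      cases ls with
      | nil => simp [pvEmit, pvGroupBy]
      | cons x xs =>
          rw [pvGroupBy]
          set run := xs.takeWhile (fun y => key y == key x) with hruneq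
          set rest := xs.dropWhile (fun y => key y == key x) with hresteq
          have hsplit : run ++ rest = xs := by
            rw [hruneq, hresteq]; exact List.takeWhile_append_dropWhile
          have hrestlen : rest.length ≤ n := by
            rw [hresteq]
            exact Nat.le_trans (List.length_dropWhile_le _ xs) (Nat.le_of_succ_le_succ h)
          have ihrest := ih rest hrestlen
          simp only [List.flatMap_cons]
          by_cases hx : key x
          · rw [if_pos hx]
            have hrun : ∀ y ∈ run, key y = true := by
              intro y hy
              rw [hruneq] at hy
              have := List.mem_takeWhile_imp hy
              simpa [hx] using this
            calc pvEmit key false (x :: xs)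
                = x :: pvEmit key false xs := by simp [pvEmit, hx]
              _ = x :: pvEmit key false (run ++ rest) := by rw [hsplit]
              _ = x :: (run ++ pvEmit key false rest) := by
                    rw [pvEmit_true_run key _ _ hrun]
              _ = _ := by simp [ihrest]
          · rw [if_neg hx]
            have hx' : key x = false := by simpa using hx
            have hrun : ∀ y ∈ run, key y = false := by
              intro y hy
              rw [hruneq] at hy
              have := List.mem_takeWhile_imp hy
              simpa [hx'] using this
            have hhead : ∀ y t, rest = y :: t → key y = true := by
              intro y t hyt
              rw [hresteq] at hyt
              have := pvDropWhile_head (fun y => key y == key x) xs y t hyt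
              simpa [hx'] using this
            calc pvEmit key false (x :: xs)
                = x :: pvEmit key true xs := by simp [pvEmit, hx']
              _ = x :: pvEmit key true (run ++ rest) := by rw [hsplit]
              _ = x :: pvEmit key true rest := by rw [pvEmit_false_run key _ _ hrun]
              _ = x :: pvEmit key false rest := by rw [pvEmit_true_eq_false key _ hhead]
              _ = _ := by simp [ihrest]

theorem pvCleanLines_eq_groupLines (lines : List String) :
    pvCleanLines lines = pvGroupLines lines := by
  unfold pvCleanLines pvGroupLines
  rw [pvFoldl_eq_emit (fun line => PySem.Str.strip line != "") lines [] false]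
  simpa using pvEmit_eq_groups (fun l => PySem.Str.strip l != "") lines.length lines le_rfl

-- ===== VERDICT (by name: the statement is the Claim_ definition above) =====
theorem clean_code_format_py_spec : Claim_equal_clean_code_format_py := by
  intro code _
  unfold Spec_clean_code_format_py clean_code_format_py clean_code_format_py_alt
  simp [pvCleanLines_eq_groupLines]
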